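-- pv_equiv track=rewrite | github.com/Samuel-nothing/MobiAgent | agent_rr/train/task_template.py | get_task_templates
-- ===== SOURCE A (Python) =====
-- import os, itertools, json
--
-- def get_task_templates(raw_template):
--     results = []
--     left_pos = 0
--     while True:
--         left = raw_template.find('(', left_pos)
--         if left == -1:
--             break
--         right = raw_template.find(')', left + 1)
--         if right == -1:
--             break
--
--         content = raw_template[left + 1: right]
--         contents = content.replace("NULL", "").split('|')
--
--         results.append({
--             'left': left,
--             'right': right,
--             'contents': contents
--         })
--
--         left_pos = right + 1
--     combinations = itertools.product(*[result['contents'] for result in results])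
--     task_templates = []
--     for combination in combinations:
--         segments = []
--         last_left = 0
--         for i, content in enumerate(combination):
--             left = results[i]['left']
--             right = results[i]['right']
--             segments.append(raw_template[last_left:left])
--             segments.append(content)
--             last_left = right + 1
--         segments.append(raw_template[last_left:])
--         task_templates.append(''.join(segments))
--     return task_templates
-- ===== SOURCE B (Python) =====
-- def get_task_templates(raw_template):
--     left = raw_template.find('(')
--     if left == -1:
--         return [raw_template]
--     right = raw_template.find(')', left + 1)
--     if right == -1:
--         return [raw_template]
--     prefix = raw_template[:left]
--     options = raw_template[left + 1:right].replace("NULL", "").split('|')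
--     tails = get_task_templates(raw_template[right + 1:])
--     return [prefix + opt + tail for opt in options for tail in tails]
-- ===== Notes on version B (the rewrite author's own statement) =====
-- stated objective: simpler
-- what changed: Replaces A's three-phase pipeline (collect all group positions in a while loop, itertools.product over their option lists, then re-join slices per combination) with a single recursion: expand the first parenthesized group and prepend prefix+option to every expansion of the suffix.
import Mathlib
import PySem

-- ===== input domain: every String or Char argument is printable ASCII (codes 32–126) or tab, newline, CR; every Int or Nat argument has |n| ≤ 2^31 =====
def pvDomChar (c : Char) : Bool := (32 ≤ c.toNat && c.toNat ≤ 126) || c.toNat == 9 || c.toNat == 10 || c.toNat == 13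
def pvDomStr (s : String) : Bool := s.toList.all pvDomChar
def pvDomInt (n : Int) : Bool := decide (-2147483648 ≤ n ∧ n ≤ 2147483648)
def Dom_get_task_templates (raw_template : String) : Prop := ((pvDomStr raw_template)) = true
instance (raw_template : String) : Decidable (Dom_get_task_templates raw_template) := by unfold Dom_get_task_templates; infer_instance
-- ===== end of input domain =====

-- B replaces A's collect-groups + itertools.product + re-join pipeline by one recursion on the
-- string (expand the first group, recurse on the suffix); same cost class, simpler decomposition.

-- ===== PORT A =====
-- A's `while True:` group-collecting loop.  The loop is ported with a fuel argument
-- (`s.length + 1` at the call site); the fuel never runs out because each iteration moves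
-- `left_pos` to `right + 1 ≤ s.length`, strictly forward by at least 2 (proved below in
-- `pvCollect_irrel`, which shows the result is fuel-independent once fuel > s.length - left_pos).
def pvCollect (s : List Char) : Nat → Int → List (Int × Int × List (List Char))
  | 0, _ => []
  | fuel+1, left_pos =>
    let l := PySem.Chars.findFrom s ['('] left_pos
    if l = -1 then []
    else
      let r := PySem.Chars.findFrom s [')'] (l + 1)
      if r = -1 then []
      else
        let contents := PySem.Chars.splitOn
          (PySem.Chars.replace (PySem.Chars.slice s (some (l + 1)) (some r)) ['N','U','L','L'] []) ['|']
        (l, r, contents) :: pvCollect s fuel (r + 1)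

-- itertools.product(*lists): first factor varies slowest.
def pvProduct : List (List (List Char)) → List (List (List Char))
  | [] => [[]]
  | l :: ls => l.flatMap (fun x => (pvProduct ls).map (fun c => x :: c))

-- A's inner `for i, content in enumerate(combination)` loop building `segments`
-- (state = remaining (content, result) pairs + last_left), plus the trailing slice.
def pvSegs (s : List Char) : Int → List (List Char × (Int × Int × List (List Char))) → List (List Char)
  | last_left, [] => [PySem.Chars.slice s (some last_left) none]
  | last_left, (content, l, r, _) :: rest =>
      PySem.Chars.slice s (some last_left) (some l) :: content :: pvSegs s (r + 1) rest

def pvTasksA (s : List Char) : List (List Char) :=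
  let results := pvCollect s (s.length + 1) 0
  (pvProduct (results.map (fun g => g.2.2))).map
    (fun comb => PySem.Chars.join [] (pvSegs s 0 (comb.zip results)))

def get_task_templates (raw_template : String) : List String :=
  (pvTasksA raw_template.toList).map String.ofList

-- ===== PORT B =====
-- B's recursion on the suffix after the first complete '(…)' group; fuel = s.length + 1 at the
-- call site, never exhausted since each recursive call drops at least one character.
def pvExpandB (s : List Char) : Nat → List (List Char)
  | 0 => [s]
  | fuel+1 =>
    let l := PySem.Chars.find s ['(']
    if l = -1 then [s]
    else
      let r := PySem.Chars.findFrom s [')'] (l + 1)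
      if r = -1 then [s]
      else
        let prefx := PySem.Chars.slice s none (some l)
        let options := PySem.Chars.splitOn
          (PySem.Chars.replace (PySem.Chars.slice s (some (l + 1)) (some r)) ['N','U','L','L'] []) ['|']
        let tails := pvExpandB (PySem.Chars.slice s (some (r + 1)) none) fuel
        options.flatMap (fun o => tails.map (fun t => prefx ++ o ++ t))

def get_task_templates_alt (raw_template : String) : List String :=
  (pvExpandB raw_template.toList (raw_template.toList.length + 1)).map String.ofList

-- ===== PRECONDITION & SPEC =====
def Spec_get_task_templates (raw_template : String) (out : List String) : Prop := out = get_task_templates_alt raw_template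
instance (raw_template : String) (out : List String) : Decidable (Spec_get_task_templates raw_template out) := by unfold Spec_get_task_templates; infer_instance

-- ===== CLAIM (what is proved, stated in full; the proofs are below) =====
def Claim_equal_get_task_templates : Prop := ∀ (raw_template : String), Dom_get_task_templates raw_template → Spec_get_task_templates raw_template (get_task_templates raw_template)

-- ===== LEMMAS AND PROOFS =====

-- basic facts about a successful findFrom at a Nat start
theorem pvFindFrom_facts (s sub : List Char) (k : Nat) (hk : k ≤ s.length) (hsub : sub ≠ [])
    (h : PySem.Chars.findFrom s sub (k : Int) ≠ -1) :
    0 ≤ PySem.Chars.findFrom s sub (k : Int) ∧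
    k ≤ (PySem.Chars.findFrom s sub (k : Int)).toNat ∧
    (PySem.Chars.findFrom s sub (k : Int)).toNat + sub.length ≤ s.length := by
  obtain ⟨h1, h2, _⟩ := PySem.Chars.findFrom_natCast_spec s sub k hk h
  have hnn : 0 ≤ PySem.Chars.findFrom s sub (k : Int) := le_trans (by positivity) h1
  have hlen := h2.length_le
  have hsub1 : 1 ≤ sub.length := by
    cases sub with
    | nil => exact absurd rfl hsub
    | cons a t => simp
  refine ⟨hnn, by omega, ?_⟩
  simp only [List.length_drop] at hlen
  omega


theorem pvJoin_nil_cons (x : List Char) (xs : List (List Char)) :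
    PySem.Chars.join [] (x :: xs) = x ++ PySem.Chars.join [] xs := by
  cases xs <;> simp [PySem.Chars.join, List.intercalate]

-- the collected groups do not depend on the fuel once it exceeds s.length - left_pos
theorem pvCollect_irrel (s : List Char) :
    ∀ f1 f2 : Nat, ∀ p : Int, 0 ≤ p → p.toNat ≤ s.length →
      s.length - p.toNat < f1 → s.length - p.toNat < f2 →
      pvCollect s f1 p = pvCollect s f2 p := by
  intro f1
  induction f1 with
  | zero => intro f2 p _ _ h _; omega
  | succ f1 ih =>
    intro f2 p hp hple h1 h2
    obtain ⟨f2', rfl⟩ : ∃ f2', f2 = f2' + 1 := ⟨f2 - 1, by omega⟩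
    rw [show p = ((p.toNat : Nat) : Int) from (Int.toNat_of_nonneg hp).symm]
    simp only [pvCollect]
    by_cases hl : PySem.Chars.findFrom s ['('] ((p.toNat : Nat) : Int) = -1
    · rw [if_pos hl, if_pos hl]
    · rw [if_neg hl, if_neg hl]
      obtain ⟨hl0, hlge, hllen⟩ := pvFindFrom_facts s ['('] p.toNat hple (by simp) hl
      set l := PySem.Chars.findFrom s ['('] ((p.toNat : Nat) : Int) with hldef
      rw [show l + 1 = (((l.toNat + 1 : Nat)) : Int) by omega]
      by_cases hr : PySem.Chars.findFrom s [')'] (((l.toNat + 1 : Nat)) : Int) = -1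
      · rw [if_pos hr, if_pos hr]
      · rw [if_neg hr, if_neg hr]
        obtain ⟨hr0, hrge, hrlen⟩ := pvFindFrom_facts s [')'] (l.toNat + 1) (by simpa using hllen) (by simp) hr
        set r := PySem.Chars.findFrom s [')'] (((l.toNat + 1 : Nat)) : Int) with hrdef
        simp only [List.length_cons, List.length_nil] at hllen hrlen
        congr 1
        exact ih f2' (r + 1) (by omega) (by omega) (by omega) (by omega)


-- every collected (left, right) pair is nonnegative
theorem pvCollect_mem (s : List Char) :
    ∀ fuel : Nat, ∀ p : Int, 0 ≤ p → p.toNat ≤ s.length →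
      ∀ g ∈ pvCollect s fuel p, 0 ≤ g.1 ∧ 0 ≤ g.2.1 := by
  intro fuel
  induction fuel with
  | zero => intro p _ _ g hg; simp [pvCollect] at hg
  | succ fuel ih =>
    intro p hp hple g hg
    rw [show p = ((p.toNat : Nat) : Int) from (Int.toNat_of_nonneg hp).symm] at hg
    simp only [pvCollect] at hg
    by_cases hl : PySem.Chars.findFrom s ['('] ((p.toNat : Nat) : Int) = -1
    · rw [if_pos hl] at hg; simp at hg
    · rw [if_neg hl] at hg
      obtain ⟨hl0, hlge, hllen⟩ := pvFindFrom_facts s ['('] p.toNat hple (by simp) hl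
      set l := PySem.Chars.findFrom s ['('] ((p.toNat : Nat) : Int) with hldef
      rw [show l + 1 = (((l.toNat + 1 : Nat)) : Int) by omega] at hg
      by_cases hr : PySem.Chars.findFrom s [')'] (((l.toNat + 1 : Nat)) : Int) = -1
      · rw [if_pos hr] at hg; simp at hg
      · rw [if_neg hr] at hg
        obtain ⟨hr0, hrge, hrlen⟩ := pvFindFrom_facts s [')'] (l.toNat + 1) (by simpa using hllen) (by simp) hr
        set r := PySem.Chars.findFrom s [')'] (((l.toNat + 1 : Nat)) : Int) with hrdef
        simp only [List.length_cons, List.length_nil] at hllen hrlen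
        rcases List.mem_cons.mp hg with h | h
        · subst h; exact ⟨hl0, hr0⟩
        · exact ih (r + 1) (by omega) (by omega) g h

-- collecting from position p + k in s = collecting from p in s.drop k, indices shifted by k
theorem pvCollect_shift (s : List Char) (k : Nat) :
    ∀ fuel : Nat, ∀ p : Int, 0 ≤ p → p.toNat + k ≤ s.length →
      pvCollect s fuel (p + (k : Int)) =
        (pvCollect (s.drop k) fuel p).map (fun g => (g.1 + (k : Int), g.2.1 + (k : Int), g.2.2)) := by
  intro fuel
  induction fuel with
  | zero => intro p _ _; simp [pvCollect]
  | succ fuel ih =>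
    intro p hp hpk
    have hdl : (s.drop k).length = s.length - k := by simp
    simp only [pvCollect]
    rw [show p = ((p.toNat : Nat) : Int) from (Int.toNat_of_nonneg hp).symm,
        show ((p.toNat : Nat) : Int) + (k : Int) = (((p.toNat + k : Nat)) : Int) by push_cast; ring,
        PySem.Chars.findFrom_natCast s ['('] (p.toNat + k) hpk,
        PySem.Chars.findFrom_natCast (s.drop k) ['('] p.toNat (by omega),
        List.drop_drop, show p.toNat + k = k + p.toNat by omega]
    by_cases hf1 : PySem.Chars.find (s.drop (k + p.toNat)) ['('] = -1
    · rw [if_pos hf1, if_pos hf1]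
      simp
    · rw [if_neg hf1, if_neg hf1]
      set f1 := PySem.Chars.find (s.drop (k + p.toNat)) ['('] with hf1def
      have hf1nn : 0 ≤ f1 := by have := PySem.Chars.neg_one_le_find (s.drop (k + p.toNat)) ['(']; omega
      have hf1len : f1.toNat + 1 ≤ s.length - (k + p.toNat) := by
        have h := (PySem.Chars.find_spec (s := s.drop (k + p.toNat)) (sub := ['(']) hf1nn).1.length_le
        simp only [List.length_cons, List.length_nil, List.length_drop] at h
        omega
      rw [if_neg (by omega : ¬ (((k + p.toNat : Nat) : Int) + f1 = -1)),
          if_neg (by omega : ¬ (((p.toNat : Nat) : Int) + f1 = -1))]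
      set m := p.toNat + f1.toNat + 1 with hmdef
      rw [show ((k + p.toNat : Nat) : Int) + f1 + 1 = ((k + m : Nat) : Int) by omega,
          show ((p.toNat : Nat) : Int) + f1 + 1 = ((m : Nat) : Int) by omega,
          PySem.Chars.findFrom_natCast s [')'] (k + m) (by omega),
          PySem.Chars.findFrom_natCast (s.drop k) [')'] m (by omega),
          List.drop_drop]
      by_cases hf2 : PySem.Chars.find (s.drop (k + m)) [')'] = -1
      · rw [if_pos hf2, if_pos hf2]
        simp
      · rw [if_neg hf2, if_neg hf2]
        set f2 := PySem.Chars.find (s.drop (k + m)) [')'] with hf2def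
        have hf2nn : 0 ≤ f2 := by have := PySem.Chars.neg_one_le_find (s.drop (k + m)) [')']; omega
        have hf2len : f2.toNat + 1 ≤ s.length - (k + m) := by
          have h := (PySem.Chars.find_spec (s := s.drop (k + m)) (sub := [')'])  hf2nn).1.length_le
          simp only [List.length_cons, List.length_nil, List.length_drop] at h
          omega
        rw [if_neg (by omega : ¬ (((k + m : Nat) : Int) + f2 = -1)),
            if_neg (by omega : ¬ (((m : Nat) : Int) + f2 = -1))]
        simp only [List.map_cons]
        refine congrArg₂ _ ?_ ?_
        · -- heads
          refine Prod.ext (by push_cast; ring) (Prod.ext (by push_cast; ring) ?_)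
          dsimp only
          simp only [PySem.Chars.slice_eq_listSlice]
          rw [show ((k + m : Nat) : Int) + f2 = ((k + m + f2.toNat : Nat) : Int) by omega,
              show ((m : Nat) : Int) + f2 = ((m + f2.toNat : Nat) : Int) by omega,
              PySem.List.slice_natCast, PySem.List.slice_natCast, List.drop_drop,
              show k + m + f2.toNat - (k + m) = m + f2.toNat - m by omega]
        · -- tails
          rw [show ((k + m : Nat) : Int) + f2 + 1 = (((m : Nat) : Int) + f2 + 1) + (k : Int) by push_cast; ring]
          rw [ih (((m : Nat) : Int) + f2 + 1) (by omega) (by omega)]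

-- re-joining shifted groups against s = re-joining the groups against s.drop k
theorem pvSegs_shift (s : List Char) (k : Nat) :
    ∀ pairs : List (List Char × (Int × Int × List (List Char))), ∀ p : Int, 0 ≤ p →
      (∀ x ∈ pairs, 0 ≤ x.2.1 ∧ 0 ≤ x.2.2.1) →
      pvSegs s (p + (k : Int)) (pairs.map (fun x => (x.1, x.2.1 + (k : Int), x.2.2.1 + (k : Int), x.2.2.2))) =
        pvSegs (s.drop k) p pairs := by
  intro pairs
  induction pairs with
  | nil =>
    intro p hp _
    simp only [List.map_nil, pvSegs, PySem.Chars.slice_eq_listSlice]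
    rw [PySem.List.slice_from s (by omega), PySem.List.slice_from (s.drop k) hp, List.drop_drop]
    have h : (p + (k : Int)).toNat = k + p.toNat := by omega
    rw [h]
  | cons x rest ih =>
    obtain ⟨c, l, r, cs⟩ := x
    intro p hp hmem
    have hl : 0 ≤ l := (hmem _ (List.mem_cons_self ..)).1
    have hr : 0 ≤ r := (hmem _ (List.mem_cons_self ..)).2
    simp only [List.map_cons, pvSegs, PySem.Chars.slice_eq_listSlice]
    refine congrArg₂ _ ?_ (congrArg _ ?_)
    · rw [PySem.List.slice_toNat s (by omega) (by omega),
        PySem.List.slice_toNat (s.drop k) hp hl, List.drop_drop]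
      have h1 : (l + (k : Int)).toNat - (p + (k : Int)).toNat = l.toNat - p.toNat := by omega
      have h2 : (p + (k : Int)).toNat = k + p.toNat := by omega
      rw [h1, h2]
    · have : r + (k : Int) + 1 = (r + 1) + (k : Int) := by ring
      rw [this, ih (r + 1) (by omega) (fun x hx => hmem x (List.mem_cons_of_mem _ hx))]

-- the two pipelines agree: A's collect+product+join = B's recursion on the suffix
theorem pvMain : ∀ fuel : Nat, ∀ s : List Char, s.length < fuel → pvTasksA s = pvExpandB s fuel := by
  intro fuel
  induction fuel with
  | zero => intro s hs; omega
  | succ fuel ih =>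
    intro s hs
    simp only [pvExpandB]
    by_cases hl : PySem.Chars.find s ['('] = -1
    · rw [if_pos hl]
      unfold pvTasksA
      have hcol : pvCollect s (s.length + 1) 0 = [] := by
        simp only [pvCollect, PySem.Chars.findFrom_zero]
        rw [if_pos hl]
      rw [hcol]
      simp [pvProduct, pvSegs, PySem.List.slice_none_none, PySem.Chars.join, List.intercalate]
    · rw [if_neg hl]
      set l := PySem.Chars.find s ['('] with hldef
      have hl0 : 0 ≤ l := by have := PySem.Chars.neg_one_le_find s ['(']; omega
      have hllen : l.toNat + 1 ≤ s.length := by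
        have h := (PySem.Chars.find_spec (s := s) (sub := ['(']) hl0).1.length_le
        simp only [List.length_cons, List.length_nil, List.length_drop] at h
        omega
      by_cases hr : PySem.Chars.findFrom s [')'] (l + 1) = -1
      · rw [if_pos hr]
        unfold pvTasksA
        have hcol : pvCollect s (s.length + 1) 0 = [] := by
          simp only [pvCollect, PySem.Chars.findFrom_zero, ← hldef]
          rw [if_neg hl, if_pos hr]
        rw [hcol]
        simp [pvProduct, pvSegs, PySem.List.slice_none_none, PySem.Chars.join, List.intercalate]
      · rw [if_neg hr]
        set r := PySem.Chars.findFrom s [')'] (l + 1) with hrdef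
        have hrfacts := pvFindFrom_facts s [')'] (l.toNat + 1) hllen (by simp)
          (by rw [show (((l.toNat + 1 : Nat)) : Int) = l + 1 by omega, ← hrdef]; exact hr)
        rw [show (((l.toNat + 1 : Nat)) : Int) = l + 1 by omega, ← hrdef] at hrfacts
        obtain ⟨hr0, hrge, hrlen⟩ := hrfacts
        simp only [List.length_cons, List.length_nil] at hrlen
        set k := r.toNat + 1 with hkdef
        have hrest : PySem.Chars.slice s (some (r + 1)) none = s.drop k := by
          simp only [PySem.Chars.slice_eq_listSlice]
          rw [PySem.List.slice_from s (by omega)]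
          congr 1
          omega
        set opts := PySem.Chars.splitOn
          (PySem.Chars.replace (PySem.Chars.slice s (some (l + 1)) (some r)) ['N','U','L','L'] []) ['|'] with hoptsdef
        set R := pvCollect (s.drop k) ((s.drop k).length + 1) 0 with hRdef
        have hcol : pvCollect s (s.length + 1) 0 =
            (l, r, opts) :: R.map (fun g => (g.1 + (k : Int), g.2.1 + (k : Int), g.2.2)) := by
          simp only [pvCollect, PySem.Chars.findFrom_zero, ← hldef, ← hrdef]
          rw [if_neg hl, if_neg hr, ← hoptsdef]
          congr 1
          rw [show r + 1 = (0 : Int) + ((k : Nat) : Int) by omega,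
              pvCollect_shift s k s.length 0 le_rfl (by simp; omega)]
          congr 1
          exact pvCollect_irrel (s.drop k) s.length ((s.drop k).length + 1) 0 le_rfl (by simp)
            (by simp; omega) (by omega)
        unfold pvTasksA
        rw [hcol]
        have hmem : ∀ cs : List (List Char), ∀ x ∈ cs.zip R, 0 ≤ x.2.1 ∧ 0 ≤ x.2.2.1 := by
          intro cs x hx
          exact pvCollect_mem (s.drop k) ((s.drop k).length + 1) 0 le_rfl (by simp) x.2
            (List.of_mem_zip hx).2
        have hF : ∀ o : List Char, ∀ cs : List (List Char),
            PySem.Chars.join [] (pvSegs s 0 ((o :: cs).zip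
              ((l, r, opts) :: R.map (fun g => (g.1 + (k : Int), g.2.1 + (k : Int), g.2.2))))) =
            PySem.Chars.slice s none (some l) ++ o ++
              PySem.Chars.join [] (pvSegs (s.drop k) 0 (cs.zip R)) := by
          intro o cs
          simp only [List.zip_cons_cons, pvSegs]
          rw [pvJoin_nil_cons, pvJoin_nil_cons, List.zip_map_right]
          have hfun : (Prod.map (@id (List Char))
              (fun g : Int × Int × List (List Char) => (g.1 + (k : Int), g.2.1 + (k : Int), g.2.2))) =
              (fun x : List Char × (Int × Int × List (List Char)) =>
                (x.1, x.2.1 + (k : Int), x.2.2.1 + (k : Int), x.2.2.2)) := by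
            funext x
            rfl
          rw [hfun, show r + 1 = (0 : Int) + ((k : Nat) : Int) by omega,
              pvSegs_shift s k (cs.zip R) 0 le_rfl (hmem cs)]
          simp only [PySem.Chars.slice_eq_listSlice, PySem.List.slice_zero_start,
            List.append_assoc]
        simp only [List.map_cons, List.map_map]
        rw [show ((fun g : Int × Int × List (List Char) => g.2.2) ∘
              (fun g : Int × Int × List (List Char) => (g.1 + (k : Int), g.2.1 + (k : Int), g.2.2)))
            = (fun g : Int × Int × List (List Char) => g.2.2) from rfl]
        simp only [pvProduct]
        rw [List.map_flatMap, hrest, ← ih (s.drop k) (by simp; omega)]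
        unfold pvTasksA
        congr 1
        funext o
        rw [List.map_map, List.map_map]
        apply List.map_congr_left
        intro cs _
        exact hF o cs

-- ===== VERDICT (by name: the statement is the Claim_ definition above) =====
theorem get_task_templates_spec : Claim_equal_get_task_templates := by
  intro raw _
  show _ = _
  unfold get_task_templates get_task_templates_alt
  rw [pvMain (raw.toList.length + 1) raw.toList (by omega)]
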